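-- pv_equiv track=rewrite | github.com/FinnMcCoding/CodeWars | Hiding_2.py | advice
-- ===== SOURCE A (Python) =====
-- def advice(agents, n):
--     safest_spaces = []
--     high_distance = 0
--     for x in range(0,n):
--         for y in range(0,n):
--             low_dist = None
--             for agent in agents:
--                 if (x,y) in agents:
--                     low_dist = 0
--                     break
--                 dist = abs((x - agent[0])) + abs((y - agent[1] ))
--                 if dist == 0:
--                     low_dist = 0
--                     break
--                 if low_dist == None or dist < low_dist:
--                     low_dist = dist
--
--             if low_dist > high_distance:
--                 safest_spaces = [(x,y)]
--                 high_distance = low_dist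
--             elif low_dist == high_distance and low_dist != 0:
--                 safest_spaces.append((x,y))
--             else:
--                 pass
--     return safest_spaces
-- ===== SOURCE B (Python) =====
-- def advice(agents, n):
--     # Multi-source L1 distance transform (two raster sweeps), then max + filter.
--     # Agents outside the grid are clamped into it, seeding the transform with
--     # their clamp offset (exact, since |x-ax| = |x-cx| + |cx-ax| for x in range).
--     if n <= 0:
--         return []
--     offs = []
--     for ax, ay in agents:
--         cx = 0 if ax < 0 else (n - 1 if ax > n - 1 else ax)
--         cy = 0 if ay < 0 else (n - 1 if ay > n - 1 else ay)
--         offs.append(((cx, cy), abs(ax - cx) + abs(ay - cy)))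
--     INF = min(o for _, o in offs) + 2 * n
--     dist = {}
--     for c, o in offs:
--         dist[c] = min(dist.get(c, INF), o)
--     for x in range(n):
--         for y in range(n):
--             v = dist.get((x, y), INF)
--             if x > 0:
--                 v = min(v, dist[(x - 1, y)] + 1)
--             if y > 0:
--                 v = min(v, dist[(x, y - 1)] + 1)
--             dist[(x, y)] = v
--     for x in range(n - 1, -1, -1):
--         for y in range(n - 1, -1, -1):
--             v = dist[(x, y)]
--             if x < n - 1:
--                 v = min(v, dist[(x + 1, y)] + 1)
--             if y < n - 1:
--                 v = min(v, dist[(x, y + 1)] + 1)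
--             dist[(x, y)] = v
--     best = max(dist.values())
--     if best == 0:
--         return []
--     return [(x, y) for x in range(n) for y in range(n) if dist[(x, y)] == best]
-- ===== Notes on version B (the rewrite author's own statement) =====
-- stated objective: faster
-- what changed: Replaces A's per-cell inner scan over all agents (with a redundant membership re-scan) by a multi-source L1 distance transform: agents are clamped into the grid and seed it with their clamp offset, two raster sweeps (relax from left/up, then from right/down) compute every cell's min distance, then one max and one filter pass.
import Mathlib
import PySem

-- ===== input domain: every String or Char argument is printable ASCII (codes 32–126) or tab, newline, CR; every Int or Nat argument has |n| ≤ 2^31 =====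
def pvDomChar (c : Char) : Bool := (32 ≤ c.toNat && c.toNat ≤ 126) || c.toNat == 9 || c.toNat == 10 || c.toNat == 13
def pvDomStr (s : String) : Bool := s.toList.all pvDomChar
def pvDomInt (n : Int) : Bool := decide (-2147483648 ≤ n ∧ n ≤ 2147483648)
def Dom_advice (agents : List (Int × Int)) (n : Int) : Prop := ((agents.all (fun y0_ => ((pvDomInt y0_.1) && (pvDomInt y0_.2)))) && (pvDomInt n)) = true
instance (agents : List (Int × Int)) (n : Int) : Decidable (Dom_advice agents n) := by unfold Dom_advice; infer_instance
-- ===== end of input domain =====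

-- B replaces A's per-cell scan over all agents by a multi-source L1 distance
-- transform: seed the grid at the clamped agent positions (offset = distance
-- agent-to-clamp), two raster sweeps, then max + filter (objective: faster).


-- ===== PORT A =====
-- A's inner `for agent in agents` loop with its two `break`s; `all` is the full agent
-- list used by the `(x,y) in agents` membership test, `low` is `low_dist`.
def adviceInner (x y : Int) (all : List (Int × Int)) :
    List (Int × Int) → Option Int → Option Int
  | [], low => low
  | a :: rest, low =>
    if (x, y) ∈ all then some 0
    else
      let dist := |x - a.1| + |y - a.2|
      if dist = 0 then some 0
      else
        match low with
        | none => adviceInner x y all rest (some dist)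
        | some l =>
          if dist < l then adviceInner x y all rest (some dist)
          else adviceInner x y all rest (some l)

-- body of A's `for y in …` loop; state = (safest_spaces, high_distance)
def adviceStep (agents : List (Int × Int)) (st : List (Int × Int) × Int) (x y : Int) :
    List (Int × Int) × Int :=
  match adviceInner x y agents agents none with
  | none => st   -- Python raises TypeError here (None > int); excluded by Pre_advice
  | some low =>
    if low > st.2 then ([(x, y)], low)
    else if low = st.2 ∧ low ≠ 0 then (st.1 ++ [(x, y)], st.2)
    else st

def advice (agents : List (Int × Int)) (n : Int) : List (Int × Int) :=
  ((PySem.List.pyRange 0 n 1).foldl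
    (fun st x =>
      (PySem.List.pyRange 0 n 1).foldl (fun st y => adviceStep agents st x y) st)
    ([], 0)).1

-- ===== PORT B =====
-- Source B's dict `dist` is a Std.HashMap (lookup/overwrite only; no order is used);
-- `dist.get(c, INF)` is getD; the plain
-- `dist[k]` reads are at keys Source B has already inserted, where getD INF = dist[k].
-- `0 if ax < 0 else (n - 1 if ax > n - 1 else ax)`
def altClamp (n a : Int) : Int := if a < 0 then 0 else if a > n - 1 then n - 1 else a

-- the `offs` list built by Source B's first loop
def altOffs (agents : List (Int × Int)) (n : Int) : List ((Int × Int) × Int) :=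
  agents.map (fun a =>
    ((altClamp n a.1, altClamp n a.2),
      |a.1 - altClamp n a.1| + |a.2 - altClamp n a.2|))

-- `INF = min(o for _, o in offs) + 2 * n` (min of empty raises; excluded by Pre_)
def altINF (agents : List (Int × Int)) (n : Int) : Int :=
  ((PySem.List.min? ((altOffs agents n).map (fun co => co.2)) (fun d => d)).getD 0) + 2 * n

-- `for c, o in offs: dist[c] = min(dist.get(c, INF), o)`
def altSeed (agents : List (Int × Int)) (n : Int) : Std.HashMap (Int × Int) Int :=
  (altOffs agents n).foldl
    (fun d co => d.insert co.1 (min (d.getD co.1 (altINF agents n)) co.2))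
    (∅ : Std.HashMap (Int × Int) Int)

-- body of the forward sweep: v = dist.get((x,y),INF); relax from (x-1,y),(x,y-1)
def altFwdStep (inf : Int) (d : Std.HashMap (Int × Int) Int) (x y : Int) :
    Std.HashMap (Int × Int) Int :=
  let v := d.getD (x, y) inf
  let v := if 0 < x then min v (d.getD (x - 1, y) inf + 1) else v
  let v := if 0 < y then min v (d.getD (x, y - 1) inf + 1) else v
  d.insert (x, y) v

def altFwd (agents : List (Int × Int)) (n : Int) : Std.HashMap (Int × Int) Int :=
  (PySem.List.pyRange 0 n 1).foldl
    (fun d x => (PySem.List.pyRange 0 n 1).foldl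
      (fun d y => altFwdStep (altINF agents n) d x y) d)
    (altSeed agents n)

-- body of the backward sweep: relax from (x+1,y),(x,y+1)
def altBwdStep (n : Int) (inf : Int) (d : Std.HashMap (Int × Int) Int) (x y : Int) :
    Std.HashMap (Int × Int) Int :=
  let v := d.getD (x, y) inf
  let v := if x < n - 1 then min v (d.getD (x + 1, y) inf + 1) else v
  let v := if y < n - 1 then min v (d.getD (x, y + 1) inf + 1) else v
  d.insert (x, y) v

def altBwd (agents : List (Int × Int)) (n : Int) : Std.HashMap (Int × Int) Int :=
  (PySem.List.pyRange (n - 1) (-1) (-1)).foldl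
    (fun d x => (PySem.List.pyRange (n - 1) (-1) (-1)).foldl
      (fun d y => altBwdStep n (altINF agents n) d x y) d)
    (altFwd agents n)

-- the grid cells in raster order (= the dict's key set after the sweeps)
def altCells (n : Int) : List (Int × Int) :=
  (PySem.List.pyRange 0 n 1).flatMap
    (fun x => (PySem.List.pyRange 0 n 1).map (fun y => (x, y)))

def advice_alt (agents : List (Int × Int)) (n : Int) : List (Int × Int) :=
  if n ≤ 0 then []
  else
    let dist := altBwd agents n
    -- `max(dist.values())`: the dict's keys are exactly the grid cells, each read
    -- here via getD at a present key; max does not depend on the order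
    let best := (PySem.List.max? ((altCells n).map
      (fun c => dist.getD c (altINF agents n))) (fun d => d)).getD 0
    if best = 0 then []
    else (altCells n).filter (fun c => dist.getD c (altINF agents n) == best)

-- ===== PRECONDITION & SPEC =====
-- Pre_ excludes only agents = [] with n > 0: there A raises TypeError (None > int)
-- and B raises ValueError (min of empty sequence).
def Pre_advice (agents : List (Int × Int)) (n : Int) : Prop := agents ≠ [] ∨ n ≤ 0
instance (agents : List (Int × Int)) (n : Int) : Decidable (Pre_advice agents n) := by
  unfold Pre_advice; infer_instance
def pvWitness_advice : (List (Int × Int)) × Int := ([(0, 0)], 3)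

def Spec_advice (agents : List (Int × Int)) (n : Int) (out : List (Int × Int)) : Prop := out = advice_alt agents n
instance (agents : List (Int × Int)) (n : Int) (out : List (Int × Int)) : Decidable (Spec_advice agents n out) := by unfold Spec_advice; infer_instance

-- ===== CLAIM (what is proved, stated in full; the proofs are below) =====
def Claim_equal_advice : Prop := ∀ (agents : List (Int × Int)) (n : Int), Dom_advice agents n → Pre_advice agents n → Spec_advice agents n (advice agents n)

-- ===== LEMMAS AND PROOFS =====

-- |z| as an if, so omega can finish abs arithmetic after split_ifs
theorem pvAbs_ite (z : Int) : |z| = if 0 ≤ z then z else -z := by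
  rcases abs_cases z with ⟨h1, h2⟩ | ⟨h1, h2⟩ <;> simp [h1] <;> omega

-- Python `d[k] = v` / `d.get(p, inf)` on a HashMap, as a pointwise if
theorem pvGetD_insert (d : Std.HashMap (Int × Int) Int) (k p : Int × Int) (v inf : Int) :
    (d.insert k v).getD p inf = if p = k then v else d.getD p inf := by
  by_cases h : p = k
  · subst h; simp
  · simp [Std.HashMap.getD_insert, h, Ne.symm h]

-- L1 distance between cells
def d2 (p q : Int × Int) : Int := |p.1 - q.1| + |p.2 - q.2|

-- min over agents of the L1 distance to (x, y): the value A's inner loop computes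
def pvMind (agents : List (Int × Int)) (x y : Int) : Int :=
  (PySem.List.min? (agents.map (fun a => |x - a.1| + |y - a.2|)) (fun d => d)).getD 0

def pvD (agents : List (Int × Int)) (c : Int × Int) : Int := pvMind agents c.1 c.2

-- the seed value B's dict holds at p before the sweeps
def pvSeedAt (agents : List (Int × Int)) (n : Int) (p : Int × Int) : Int :=
  (altSeed agents n).getD p (altINF agents n)

-- the multi-source objective: min over grid cells q of seed(q) + d2(p, q)
def pvG (agents : List (Int × Int)) (n : Int) (p : Int × Int) : Int :=
  (PySem.List.min? ((altCells n).map (fun q => pvSeedAt agents n q + d2 p q))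
    (fun v => v)).getD 0

-- helpers for `(min? l id).getD 0` on a nonempty list
theorem pvMin_le {l : List Int} {v : Int} (hv : v ∈ l) :
    (PySem.List.min? l (fun x => x)).getD 0 ≤ v := by
  cases h : PySem.List.min? l (fun x => x) with
  | none => rw [PySem.List.min?_eq_none_iff] at h; subst h; cases hv
  | some m => simpa using PySem.List.min?_isMin h v hv

theorem pvMin_mem {l : List Int} (hne : l ≠ []) :
    (PySem.List.min? l (fun x => x)).getD 0 ∈ l := by
  cases h : PySem.List.min? l (fun x => x) with
  | none => rw [PySem.List.min?_eq_none_iff] at h; exact absurd h hne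
  | some m => simpa using PySem.List.min?_mem h

-- ===== A-side characterisation (accumulator loop = max-then-filter) =====

theorem pvDist_nonneg (x y : Int) (a : Int × Int) : 0 ≤ |x - a.1| + |y - a.2| := by
  positivity

theorem pvDist_ne_zero (x y : Int) (a : Int × Int) (all : List (Int × Int))
    (ha : a ∈ all) (hout : (x, y) ∉ all) : ¬ (|x - a.1| + |y - a.2| = 0) := by
  intro h0
  have h1 : 0 ≤ |x - a.1| := abs_nonneg _
  have h2 : 0 ≤ |y - a.2| := abs_nonneg _
  have hx : x = a.1 := by
    have : |x - a.1| = 0 := by omega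
    have := abs_eq_zero.mp this; omega
  have hy : y = a.2 := by
    have : |y - a.2| = 0 := by omega
    have := abs_eq_zero.mp this; omega
  exact hout (by rw [hx, hy]; simpa using ha)

theorem pvD_nonneg (agents : List (Int × Int)) (c : Int × Int) :
    0 ≤ pvD agents c := by
  unfold pvD pvMind
  cases hm : PySem.List.min? (agents.map (fun a => |c.1 - a.1| + |c.2 - a.2|)) (fun d => d) with
  | none => simp
  | some m =>
    have hmem := PySem.List.min?_mem hm
    simp only [List.mem_map] at hmem
    obtain ⟨a, -, rfl⟩ := hmem
    simpa using pvDist_nonneg c.1 c.2 a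

-- inner loop, started with an accumulator, when (x,y) is not an agent
theorem adviceInner_some (x y : Int) (all : List (Int × Int)) (hout : (x, y) ∉ all)
    (l : List (Int × Int)) (hsub : ∀ a ∈ l, a ∈ all) (m : Int) :
    adviceInner x y all l (some m) =
      some ((l.map (fun a => |x - a.1| + |y - a.2|)).foldl min m) := by
  induction l generalizing m with
  | nil => simp [adviceInner]
  | cons a rest ih =>
    have ha : a ∈ all := hsub a (by simp)
    have hd := pvDist_ne_zero x y a all ha hout
    have hrest : ∀ b ∈ rest, b ∈ all := fun b hb => hsub b (by simp [hb])
    rw [adviceInner, if_neg hout]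
    simp only [if_neg hd]
    by_cases hlt : |x - a.1| + |y - a.2| < m
    · rw [if_pos hlt, ih hrest]
      simp [min_eq_right (le_of_lt hlt)]
    · rw [if_neg hlt, ih hrest]
      simp [min_eq_left (le_of_not_gt hlt)]

theorem adviceInner_eq (x y : Int) (agents : List (Int × Int)) (h : agents ≠ []) :
    adviceInner x y agents agents none = some (pvMind agents x y) := by
  obtain ⟨a, rest, rfl⟩ : ∃ a rest, agents = a :: rest := by
    cases agents with
    | nil => exact absurd rfl h
    | cons a rest => exact ⟨a, rest, rfl⟩
  by_cases hin : (x, y) ∈ a :: rest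
  · rw [adviceInner, if_pos hin]
    unfold pvMind
    cases hm : PySem.List.min? ((a :: rest).map (fun b => |x - b.1| + |y - b.2|)) (fun d => d) with
    | none => simp [PySem.List.min?_eq_none_iff] at hm
    | some m =>
      have hmem := PySem.List.min?_mem hm
      simp only [List.mem_map] at hmem
      obtain ⟨b, -, rfl⟩ := hmem
      have h0mem : (0 : Int) ∈ (a :: rest).map (fun b => |x - b.1| + |y - b.2|) :=
        List.mem_map.mpr ⟨(x, y), hin, by simp⟩
      have hle := PySem.List.min?_isMin hm 0 h0mem
      simp only at hle
      have hnn := pvDist_nonneg x y b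
      simp only [Option.getD_some]
      exact congrArg some (by omega)
  · rw [adviceInner, if_neg hin]
    have hd := pvDist_ne_zero x y a (a :: rest) (by simp) hin
    simp only [if_neg hd]
    rw [adviceInner_some x y (a :: rest) hin rest (fun b hb => by simp [hb]) _]
    unfold pvMind
    rw [List.map_cons, PySem.List.min?_id_cons]
    simp

-- A's per-cell state update, written against the distance function pvD
def pvStep (agents : List (Int × Int)) (st : List (Int × Int) × Int) (c : Int × Int) :
    List (Int × Int) × Int :=
  if pvD agents c > st.2 then ([c], pvD agents c)
  else if pvD agents c = st.2 ∧ pvD agents c ≠ 0 then (st.1 ++ [c], st.2)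
  else st

def pvM (agents : List (Int × Int)) (cs : List (Int × Int)) : Int :=
  cs.foldl (fun h c => max h (pvD agents c)) 0

-- the accumulator fold is max-then-filter (for any cell list)
theorem pvFold_char (agents : List (Int × Int)) (cs : List (Int × Int)) :
    cs.foldl (pvStep agents) ([], 0) =
      (if pvM agents cs = 0 then []
       else cs.filter (fun c => pvD agents c == pvM agents cs), pvM agents cs) := by
  induction cs using List.reverseRecOn with
  | nil => simp [pvM]
  | append_singleton cs c ih =>
    have hM : pvM agents (cs ++ [c]) = max (pvM agents cs) (pvD agents c) := by
      simp [pvM, List.foldl_append]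
    have hM0 : 0 ≤ pvM agents cs :=
      (PySem.List.le_foldl_max_int cs (pvD agents) 0).1
    have hle : ∀ e ∈ cs, pvD agents e ≤ pvM agents cs :=
      (PySem.List.le_foldl_max_int cs (pvD agents) 0).2
    have hd0 : 0 ≤ pvD agents c := pvD_nonneg agents c
    rw [List.foldl_append, List.foldl_cons, List.foldl_nil, ih]
    rcases lt_trichotomy (pvM agents cs) (pvD agents c) with hlt | heq | hgt
    · have hmax : max (pvM agents cs) (pvD agents c) = pvD agents c := max_eq_right hlt.le
      have hne : ¬ (pvD agents c = 0) := by omega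
      have hfil : cs.filter (fun e => pvD agents e == pvD agents c) = [] := by
        rw [List.filter_eq_nil_iff]
        intro e he
        have := hle e he
        simp only [beq_iff_eq]
        omega
      simp [pvStep, hlt, hM, hmax, hne, List.filter_append, hfil]
    · have hmax : max (pvM agents cs) (pvD agents c) = pvM agents cs := by omega
      by_cases h0 : pvM agents cs = 0
      · have hdc0 : pvD agents c = 0 := by omega
        simp [pvStep, heq, hM, hdc0]
      · have hngt : ¬ pvD agents c > pvM agents cs := by omega
        have hdc0 : ¬ pvD agents c = 0 := by omega
        simp [pvStep, heq, hM, hdc0, List.filter_append]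
    · have hmax : max (pvM agents cs) (pvD agents c) = pvM agents cs := by omega
      have h0 : ¬ pvM agents cs = 0 := by omega
      have hne : ¬ (pvD agents c = pvM agents cs) := by omega
      have : ¬ pvD agents c > pvM agents cs := by omega
      simp [pvStep, this, hne, h0, hM, hmax, List.filter_append]

theorem foldl_nested_flatMap (rx ry : List Int)
    (g : List (Int × Int) × Int → Int × Int → List (Int × Int) × Int)
    (init : List (Int × Int) × Int) :
    rx.foldl (fun st x => ry.foldl (fun st y => g st (x, y)) st) init
      = (rx.flatMap (fun x => ry.map (fun y => (x, y)))).foldl g init := by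
  induction rx generalizing init with
  | nil => simp
  | cons x xs ih => simp [List.foldl_append, List.foldl_map, ih]

theorem pvBest_eq (agents : List (Int × Int)) (cs : List (Int × Int)) :
    (PySem.List.max? (cs.map (pvD agents)) (fun d => d)).getD 0 = pvM agents cs := by
  cases cs with
  | nil =>
    have hnone : PySem.List.max? ([] : List Int) (fun d => d) = none := rfl
    simp [pvM, hnone]
  | cons c t =>
    rw [List.map_cons, PySem.List.max?_id_cons]
    have h0 : max 0 (pvD agents c) = pvD agents c := max_eq_right (pvD_nonneg agents c)
    simp [pvM, List.foldl_map, h0]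

-- A = max-then-filter over the raster cells (agents nonempty)
theorem advice_char (agents : List (Int × Int)) (n : Int) (h : agents ≠ []) :
    advice agents n =
      (if pvM agents (altCells n) = 0 then []
       else (altCells n).filter (fun c => pvD agents c == pvM agents (altCells n))) := by
  have hstep : (fun st x => (PySem.List.pyRange 0 n 1).foldl
      (fun st y => adviceStep agents st x y) st)
      = (fun st x => (PySem.List.pyRange 0 n 1).foldl
      (fun st y => pvStep agents st (x, y)) st) := by
    funext st x
    congr 1
    funext st y
    unfold adviceStep pvStep
    rw [adviceInner_eq x y agents h]
    rfl
  unfold advice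
  rw [hstep, foldl_nested_flatMap]
  rw [show ((PySem.List.pyRange 0 n 1).flatMap
      (fun x => (PySem.List.pyRange 0 n 1).map (fun y => (x, y)))) = altCells n from rfl]
  rw [pvFold_char]

-- ===== grid cells =====

theorem mem_altCells {n : Int} {c : Int × Int} :
    c ∈ altCells n ↔ 0 ≤ c.1 ∧ c.1 < n ∧ 0 ≤ c.2 ∧ c.2 < n := by
  obtain ⟨x, y⟩ := c
  simp only [altCells, List.mem_flatMap, List.mem_map, PySem.List.mem_pyRange_one,
    Prod.mk.injEq]
  constructor
  · rintro ⟨a, ha, b, hb, rfl, rfl⟩; exact ⟨ha.1, ha.2, hb.1, hb.2⟩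
  · rintro ⟨h1, h2, h3, h4⟩; exact ⟨x, ⟨h1, h2⟩, y, ⟨h3, h4⟩, rfl, rfl⟩

theorem altCells_ne {n : Int} (hn : 0 < n) : altCells n ≠ [] := by
  have h : ((0 : Int), (0 : Int)) ∈ altCells n :=
    mem_altCells.mpr ⟨le_refl 0, hn, le_refl 0, hn⟩
  exact List.ne_nil_of_mem h

theorem cell_to_nat {n : Int} {N : Nat} (hn : n = (N : Int)) {c : Int × Int}
    (hc : c ∈ altCells n) :
    ∃ a b : Nat, a < N ∧ b < N ∧ c = ((a : Int), (b : Int)) := by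
  rw [mem_altCells] at hc
  refine ⟨c.1.toNat, c.2.toNat, by omega, by omega, ?_⟩
  obtain ⟨x, y⟩ := c
  simp only [Prod.mk.injEq]
  constructor <;> [skip; skip] <;> simp at hc ⊢ <;> omega

-- ===== clamp / offs / INF / seed =====

theorem altClamp_mem {n a : Int} (hn : 0 < n) :
    0 ≤ altClamp n a ∧ altClamp n a < n := by
  unfold altClamp; split_ifs <;> omega

theorem altClamp_decomp {n x a : Int} (hx0 : 0 ≤ x) (hxn : x < n) :
    |x - a| = |x - altClamp n a| + |altClamp n a - a| := by
  unfold altClamp; split_ifs <;> simp only [pvAbs_ite] <;> split_ifs <;> omega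

-- off(a) + d2(p, clamp(a)) = L1(p, a) for p in the grid
theorem pvL1_decomp (n : Int) (p a : Int × Int)
    (hp : 0 ≤ p.1 ∧ p.1 < n ∧ 0 ≤ p.2 ∧ p.2 < n) :
    (|a.1 - altClamp n a.1| + |a.2 - altClamp n a.2|)
      + d2 p (altClamp n a.1, altClamp n a.2) = |p.1 - a.1| + |p.2 - a.2| := by
  have h1 := altClamp_decomp (n := n) (a := a.1) hp.1 hp.2.1
  have h2 := altClamp_decomp (n := n) (a := a.2) hp.2.2.1 hp.2.2.2
  have c1 : |a.1 - altClamp n a.1| = |altClamp n a.1 - a.1| := abs_sub_comm _ _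
  have c2 : |a.2 - altClamp n a.2| = |altClamp n a.2 - a.2| := abs_sub_comm _ _
  simp only [d2]
  omega

theorem pvD_le (agents : List (Int × Int)) (p : Int × Int) {a : Int × Int}
    (ha : a ∈ agents) : pvD agents p ≤ |p.1 - a.1| + |p.2 - a.2| :=
  pvMin_le (List.mem_map.mpr ⟨a, ha, rfl⟩)

theorem pvD_attain (agents : List (Int × Int)) (p : Int × Int) (hA : agents ≠ []) :
    ∃ a ∈ agents, pvD agents p = |p.1 - a.1| + |p.2 - a.2| := by
  have hm := pvMin_mem (l := agents.map (fun a => |p.1 - a.1| + |p.2 - a.2|))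
    (by simpa using hA)
  rw [List.mem_map] at hm
  obtain ⟨a, ha, he⟩ := hm
  exact ⟨a, ha, he.symm⟩

theorem altINF_attain {agents : List (Int × Int)} {n : Int} (hA : agents ≠ []) :
    ∃ co ∈ altOffs agents n, altINF agents n = co.2 + 2 * n := by
  have hm := pvMin_mem (l := (altOffs agents n).map (fun co => co.2))
    (by simpa [altOffs] using hA)
  rw [List.mem_map] at hm
  obtain ⟨co, hco, he⟩ := hm
  exact ⟨co, hco, by unfold altINF; omega⟩

-- seed dict: a fold of min-inserts never increases a value
theorem seed_fold_mono (l : List ((Int × Int) × Int)) (inf : Int)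
    (d : Std.HashMap (Int × Int) Int) (p : Int × Int) :
    (l.foldl (fun d co => d.insert co.1 (min (d.getD co.1 inf) co.2)) d).getD p inf
      ≤ d.getD p inf := by
  induction l generalizing d with
  | nil => simp
  | cons co t ih =>
    refine le_trans (ih _) ?_
    rw [pvGetD_insert]
    split_ifs with h
    · subst h; exact min_le_left _ _
    · exact le_refl _

theorem seed_fold_cases (l : List ((Int × Int) × Int)) (inf : Int)
    (d : Std.HashMap (Int × Int) Int) (p : Int × Int) :
    (l.foldl (fun d co => d.insert co.1 (min (d.getD co.1 inf) co.2)) d).getD p inf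
        = d.getD p inf ∨
      ∃ co ∈ l, co.1 = p ∧
        (l.foldl (fun d co => d.insert co.1 (min (d.getD co.1 inf) co.2)) d).getD p inf
          = co.2 := by
  induction l generalizing d with
  | nil => left; rfl
  | cons co t ih =>
    rw [List.foldl_cons]
    rcases ih (d.insert co.1 (min (d.getD co.1 inf) co.2)) with h | ⟨co', hco', he, hv⟩
    · rw [h, pvGetD_insert]
      split_ifs with hpc
      · rcases min_cases (d.getD co.1 inf) co.2 with ⟨hm, -⟩ | ⟨hm, -⟩
        · left; rw [hm, hpc]
        · right; exact ⟨co, by simp, hpc.symm, hm⟩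
      · left; rfl
    · right; exact ⟨co', by simp [hco'], he, hv⟩

theorem pvSeed_le_off {agents : List (Int × Int)} {n : Int} :
    ∀ co ∈ altOffs agents n, pvSeedAt agents n co.1 ≤ co.2 := by
  intro co hco
  obtain ⟨s, t, heq⟩ := List.append_of_mem hco
  unfold pvSeedAt altSeed
  rw [heq, List.foldl_append, List.foldl_cons]
  refine le_trans (seed_fold_mono _ _ _ _) ?_
  rw [pvGetD_insert, if_pos rfl]
  exact min_le_right _ _

theorem pvSeed_cases (agents : List (Int × Int)) (n : Int) (p : Int × Int) :
    pvSeedAt agents n p = altINF agents n ∨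
      ∃ co ∈ altOffs agents n, co.1 = p ∧ pvSeedAt agents n p = co.2 := by
  have := seed_fold_cases (altOffs agents n) (altINF agents n)
    (∅ : Std.HashMap (Int × Int) Int) p
  simpa [pvSeedAt, altSeed, Std.HashMap.getD_empty] using this

theorem d2_nonneg (p q : Int × Int) : 0 ≤ d2 p q := by
  unfold d2; positivity

theorem d2_tri (p r q : Int × Int) : d2 p q ≤ d2 p r + d2 r q := by
  unfold d2
  have h1 := abs_sub_le p.1 r.1 q.1
  have h2 := abs_sub_le p.2 r.2 q.2
  omega

theorem d2_grid_bound {n : Int} {p q : Int × Int}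
    (hp : 0 ≤ p.1 ∧ p.1 < n ∧ 0 ≤ p.2 ∧ p.2 < n)
    (hq : 0 ≤ q.1 ∧ q.1 < n ∧ 0 ≤ q.2 ∧ q.2 < n) :
    d2 p q ≤ 2 * (n - 1) := by
  unfold d2; simp only [pvAbs_ite]; split_ifs <;> omega

theorem pvG_le (agents : List (Int × Int)) (n : Int) (p : Int × Int) {q : Int × Int}
    (hq : q ∈ altCells n) : pvG agents n p ≤ pvSeedAt agents n q + d2 p q :=
  pvMin_le (List.mem_map.mpr ⟨q, hq, rfl⟩)

theorem pvG_attain (agents : List (Int × Int)) (n : Int) (p : Int × Int) (hn : 0 < n) :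
    ∃ q ∈ altCells n, pvG agents n p = pvSeedAt agents n q + d2 p q := by
  have hm := pvMin_mem (l := (altCells n).map (fun q => pvSeedAt agents n q + d2 p q))
    (by simpa using altCells_ne hn)
  rw [List.mem_map] at hm
  obtain ⟨q, hq, he⟩ := hm
  exact ⟨q, hq, he.symm⟩

theorem altOffs_elim {agents : List (Int × Int)} {n : Int} {co : (Int × Int) × Int}
    (hco : co ∈ altOffs agents n) :
    ∃ a ∈ agents, co = ((altClamp n a.1, altClamp n a.2),
      |a.1 - altClamp n a.1| + |a.2 - altClamp n a.2|) := by
  simp only [altOffs, List.mem_map] at hco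
  obtain ⟨a, ha, he⟩ := hco
  exact ⟨a, ha, he.symm⟩

theorem pvG_eq_pvD (agents : List (Int × Int)) (n : Int) (hA : agents ≠ [])
    (hn : 0 < n) {p : Int × Int} (hp : p ∈ altCells n) :
    pvG agents n p = pvD agents p := by
  have hpg := mem_altCells.mp hp
  apply le_antisymm
  · obtain ⟨a, ha, he⟩ := pvD_attain agents p hA
    have hc1 := altClamp_mem (n := n) (a := a.1) hn
    have hc2 := altClamp_mem (n := n) (a := a.2) hn
    have hcmem : (altClamp n a.1, altClamp n a.2) ∈ altCells n :=
      mem_altCells.mpr ⟨hc1.1, hc1.2, hc2.1, hc2.2⟩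
    have h1 := pvG_le agents n p hcmem
    have h2 : pvSeedAt agents n (altClamp n a.1, altClamp n a.2)
        ≤ |a.1 - altClamp n a.1| + |a.2 - altClamp n a.2| :=
      pvSeed_le_off _ (List.mem_map.mpr ⟨a, ha, rfl⟩)
    have h3 := pvL1_decomp n p a hpg
    omega
  · obtain ⟨q, hq, he⟩ := pvG_attain agents n p hn
    have hqg := mem_altCells.mp hq
    rcases pvSeed_cases agents n q with hs | ⟨co, hco, hk, hv⟩
    · obtain ⟨co0, hco0, hinf⟩ := altINF_attain (n := n) hA
      obtain ⟨a0, ha0, hc0⟩ := altOffs_elim hco0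
      have hc1 := altClamp_mem (n := n) (a := a0.1) hn
      have hc2 := altClamp_mem (n := n) (a := a0.2) hn
      have h1 : pvD agents p ≤ |p.1 - a0.1| + |p.2 - a0.2| := pvD_le agents p ha0
      have h2 := pvL1_decomp n p a0 hpg
      have h3 : d2 p (altClamp n a0.1, altClamp n a0.2) ≤ 2 * (n - 1) :=
        d2_grid_bound hpg ⟨hc1.1, hc1.2, hc2.1, hc2.2⟩
      have h4 := d2_nonneg p q
      have h5 : co0.2 = |a0.1 - altClamp n a0.1| + |a0.2 - altClamp n a0.2| := by
        rw [hc0]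
      rw [hc0] at hinf
      simp only at hinf
      omega
    · obtain ⟨a, ha, hc⟩ := altOffs_elim hco
      have h1 : pvD agents p ≤ |p.1 - a.1| + |p.2 - a.2| := pvD_le agents p ha
      have h2 := pvL1_decomp n p a hpg
      have hq' : q = (altClamp n a.1, altClamp n a.2) := by rw [hc] at hk; exact hk.symm
      rw [hc] at hv
      simp only at hv
      rw [he, hv, hq']
      omega

theorem pvG_lip (agents : List (Int × Int)) (n : Int) (hn : 0 < n)
    (p p' : Int × Int) : pvG agents n p ≤ pvG agents n p' + d2 p p' := by
  obtain ⟨q, hq, he⟩ := pvG_attain agents n p' hn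
  have h1 := pvG_le agents n p hq
  have h2 := d2_tri p p' q
  omega

theorem pvG_le_seed (agents : List (Int × Int)) (n : Int) {p : Int × Int}
    (hp : p ∈ altCells n) : pvG agents n p ≤ pvSeedAt agents n p := by
  have h0 : d2 p p = 0 := by unfold d2; simp
  have h := pvG_le agents n p (q := p) hp
  omega

-- ===== the two sweeps, as recursions over nat coordinates =====

def pvFwdRec (s : Int × Int → Int) (x y : Nat) : Int :=
  let v := s ((x : Int), (y : Int))
  let v := if h : 0 < x then min v (pvFwdRec s (x - 1) y + 1) else v
  if h : 0 < y then min v (pvFwdRec s x (y - 1) + 1) else v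
termination_by (x, y)

def pvBwdRec (F : Int × Int → Int) (N : Nat) (x y : Nat) : Int :=
  let v := F ((x : Int), (y : Int))
  let v := if h : x < N - 1 then min v (pvBwdRec F N (x + 1) y + 1) else v
  if h : y < N - 1 then min v (pvBwdRec F N x (y + 1) + 1) else v
termination_by (N - x, N - y)

theorem pvFwdRec_le_s (s : Int × Int → Int) (x y : Nat) :
    pvFwdRec s x y ≤ s ((x : Int), (y : Int)) := by
  by_cases h1 : 0 < x <;> by_cases h2 : 0 < y <;>
    rw [pvFwdRec] <;> simp [h1, h2]

theorem pvFwdRec_le_left (s : Int × Int → Int) (x y : Nat) (hx : 0 < x) :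
    pvFwdRec s x y ≤ pvFwdRec s (x - 1) y + 1 := by
  by_cases h2 : 0 < y <;> rw [pvFwdRec] <;> simp [hx, h2]

theorem pvFwdRec_le_up (s : Int × Int → Int) (x y : Nat) (hy : 0 < y) :
    pvFwdRec s x y ≤ pvFwdRec s x (y - 1) + 1 := by
  by_cases h1 : 0 < x <;> rw [pvFwdRec] <;> simp [h1, hy]

theorem le_pvFwdRec (s : Int × Int → Int) (x y : Nat) (t : Int)
    (h0 : t ≤ s ((x : Int), (y : Int)))
    (hx : 0 < x → t ≤ pvFwdRec s (x - 1) y + 1)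
    (hy : 0 < y → t ≤ pvFwdRec s x (y - 1) + 1) :
    t ≤ pvFwdRec s x y := by
  by_cases h1 : 0 < x <;> by_cases h2 : 0 < y <;> rw [pvFwdRec] <;> simp [h1, h2]
  · have k1 := hx h1; have k2 := hy h2; omega
  · have k1 := hx h1; omega
  · have k2 := hy h2; omega
  · omega

theorem pvFwdRec_le (s : Int × Int → Int) :
    ∀ (x y a b : Nat), a ≤ x → b ≤ y →
      pvFwdRec s x y ≤ s ((a : Int), (b : Int)) + ((x : Int) - a) + ((y : Int) - b) := by
  have H : ∀ (m x y a b : Nat), x + y ≤ m → a ≤ x → b ≤ y →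
      pvFwdRec s x y ≤ s ((a : Int), (b : Int)) + ((x : Int) - a) + ((y : Int) - b) := by
    intro m
    induction m with
    | zero =>
      intro x y a b hm ha hb
      have hx0 : x = 0 := by omega
      have hy0 : y = 0 := by omega
      have ha0 : a = 0 := by omega
      have hb0 : b = 0 := by omega
      subst hx0; subst hy0; subst ha0; subst hb0
      have := pvFwdRec_le_s s 0 0
      simpa using this
    | succ m ih =>
      intro x y a b hm ha hb
      rcases Nat.lt_or_ge a x with hax | hax
      · have h1 := pvFwdRec_le_left s x y (by omega)
        have h2 := ih (x - 1) y a b (by omega) (by omega) hb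
        omega
      · have hax' : a = x := by omega
        subst hax'
        rcases Nat.lt_or_ge b y with hby | hby
        · have h1 := pvFwdRec_le_up s a y (by omega)
          have h2 := ih a (y - 1) a b (by omega) (le_refl _) (by omega)
          omega
        · have hby' : b = y := by omega
          subst hby'
          have := pvFwdRec_le_s s a b
          omega
  exact fun x y a b ha hb => H (x + y) x y a b (le_refl _) ha hb

theorem pvFwdRec_ge (s g : Int × Int → Int) (N : Nat)
    (hgs : ∀ a b : Nat, a < N → b < N → g ((a : Int), (b : Int)) ≤ s ((a : Int), (b : Int)))
    (hlip : ∀ p q : Int × Int, g p ≤ g q + d2 p q) :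
    ∀ x y : Nat, x < N → y < N → g ((x : Int), (y : Int)) ≤ pvFwdRec s x y := by
  have H : ∀ (m x y : Nat), x + y ≤ m → x < N → y < N →
      g ((x : Int), (y : Int)) ≤ pvFwdRec s x y := by
    intro m
    induction m with
    | zero =>
      intro x y hm hx hy
      have hx0 : x = 0 := by omega
      have hy0 : y = 0 := by omega
      subst hx0; subst hy0
      refine le_pvFwdRec s 0 0 _ (hgs 0 0 hx hy) (by omega) (by omega)
    | succ m ih =>
      intro x y hm hx hy
      refine le_pvFwdRec s x y _ (hgs x y hx hy) ?_ ?_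
      · intro hx0
        have hd : d2 ((x : Int), (y : Int)) (((x - 1 : Nat) : Int), (y : Int)) = 1 := by
          simp only [d2]
          simp only [pvAbs_ite]
          split_ifs <;> omega
        have h1 := hlip ((x : Int), (y : Int)) (((x - 1 : Nat) : Int), (y : Int))
        have h2 := ih (x - 1) y (by omega) (by omega) hy
        omega
      · intro hy0
        have hd : d2 ((x : Int), (y : Int)) ((x : Int), ((y - 1 : Nat) : Int)) = 1 := by
          simp only [d2]
          simp only [pvAbs_ite]
          split_ifs <;> omega
        have h1 := hlip ((x : Int), (y : Int)) ((x : Int), ((y - 1 : Nat) : Int))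
        have h2 := ih x (y - 1) (by omega) hx (by omega)
        omega
  exact fun x y hx hy => H (x + y) x y (le_refl _) hx hy

theorem pvBwdRec_le_F (F : Int × Int → Int) (N x y : Nat) :
    pvBwdRec F N x y ≤ F ((x : Int), (y : Int)) := by
  by_cases h1 : x < N - 1 <;> by_cases h2 : y < N - 1 <;>
    rw [pvBwdRec] <;> simp [h1, h2]

theorem pvBwdRec_le_right (F : Int × Int → Int) (N x y : Nat) (hx : x < N - 1) :
    pvBwdRec F N x y ≤ pvBwdRec F N (x + 1) y + 1 := by
  by_cases h2 : y < N - 1 <;> rw [pvBwdRec] <;> simp [hx, h2]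

theorem pvBwdRec_le_down (F : Int × Int → Int) (N x y : Nat) (hy : y < N - 1) :
    pvBwdRec F N x y ≤ pvBwdRec F N x (y + 1) + 1 := by
  by_cases h1 : x < N - 1 <;> rw [pvBwdRec] <;> simp [h1, hy]

theorem le_pvBwdRec (F : Int × Int → Int) (N x y : Nat) (t : Int)
    (h0 : t ≤ F ((x : Int), (y : Int)))
    (hx : x < N - 1 → t ≤ pvBwdRec F N (x + 1) y + 1)
    (hy : y < N - 1 → t ≤ pvBwdRec F N x (y + 1) + 1) :
    t ≤ pvBwdRec F N x y := by
  by_cases h1 : x < N - 1 <;> by_cases h2 : y < N - 1 <;> rw [pvBwdRec] <;> simp [h1, h2]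
  · have k1 := hx h1; have k2 := hy h2; omega
  · have k1 := hx h1; omega
  · have k2 := hy h2; omega
  · omega

theorem pvBwdRec_le (F T : Int × Int → Int) (N : Nat)
    (hF : ∀ x y a b : Nat, a ≤ x → x < N → b ≤ y → y < N →
      F ((x : Int), (y : Int)) ≤ T ((a : Int), (b : Int)) + ((x : Int) - a) + ((y : Int) - b)) :
    ∀ x y a b : Nat, x < N → y < N → a < N → b < N →
      pvBwdRec F N x y ≤ T ((a : Int), (b : Int)) + d2 ((x : Int), (y : Int)) ((a : Int), (b : Int)) := by
  have H : ∀ (m x y a b : Nat), (N - x) + (N - y) ≤ m → x < N → y < N → a < N → b < N →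
      pvBwdRec F N x y ≤ T ((a : Int), (b : Int)) + d2 ((x : Int), (y : Int)) ((a : Int), (b : Int)) := by
    intro m
    induction m with
    | zero => intro x y a b hm hx hy ha hb; omega
    | succ m ih =>
      intro x y a b hm hx hy ha hb
      rcases Nat.lt_or_ge x a with hxa | hxa
      · have hd : d2 ((x : Int), (y : Int)) ((a : Int), (b : Int))
            = d2 (((x + 1 : Nat) : Int), (y : Int)) ((a : Int), (b : Int)) + 1 := by
          simp only [d2]
          simp only [pvAbs_ite]
          split_ifs <;> omega
        have h1 := pvBwdRec_le_right F N x y (by omega)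
        have h2 := ih (x + 1) y a b (by omega) (by omega) hy ha hb
        omega
      · rcases Nat.lt_or_ge y b with hyb | hyb
        · have hd : d2 ((x : Int), (y : Int)) ((a : Int), (b : Int))
              = d2 ((x : Int), ((y + 1 : Nat) : Int)) ((a : Int), (b : Int)) + 1 := by
            simp only [d2]
            simp only [pvAbs_ite]
            split_ifs <;> omega
          have h1 := pvBwdRec_le_down F N x y (by omega)
          have h2 := ih x (y + 1) a b (by omega) hx (by omega) ha hb
          omega
        · have hd : d2 ((x : Int), (y : Int)) ((a : Int), (b : Int))
              = ((x : Int) - a) + ((y : Int) - b) := by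
            simp only [d2]
            simp only [pvAbs_ite]
            split_ifs <;> omega
          have h1 := pvBwdRec_le_F F N x y
          have h2 := hF x y a b (by omega) hx (by omega) hy
          omega
  exact fun x y a b hx hy ha hb => H ((N - x) + (N - y)) x y a b (le_refl _) hx hy ha hb

theorem pvBwdRec_ge (F g : Int × Int → Int) (N : Nat)
    (hgF : ∀ a b : Nat, a < N → b < N → g ((a : Int), (b : Int)) ≤ F ((a : Int), (b : Int)))
    (hlip : ∀ p q : Int × Int, g p ≤ g q + d2 p q) :
    ∀ x y : Nat, x < N → y < N → g ((x : Int), (y : Int)) ≤ pvBwdRec F N x y := by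
  have H : ∀ (m x y : Nat), (N - x) + (N - y) ≤ m → x < N → y < N →
      g ((x : Int), (y : Int)) ≤ pvBwdRec F N x y := by
    intro m
    induction m with
    | zero => intro x y hm hx hy; omega
    | succ m ih =>
      intro x y hm hx hy
      refine le_pvBwdRec F N x y _ (hgF x y hx hy) ?_ ?_
      · intro hx0
        have hd : d2 ((x : Int), (y : Int)) (((x + 1 : Nat) : Int), (y : Int)) = 1 := by
          simp only [d2]
          simp only [pvAbs_ite]
          split_ifs <;> omega
        have h1 := hlip ((x : Int), (y : Int)) (((x + 1 : Nat) : Int), (y : Int))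
        have h2 := ih (x + 1) y (by omega) (by omega) hy
        omega
      · intro hy0
        have hd : d2 ((x : Int), (y : Int)) ((x : Int), ((y + 1 : Nat) : Int)) = 1 := by
          simp only [d2]
          simp only [pvAbs_ite]
          split_ifs <;> omega
        have h1 := hlip ((x : Int), (y : Int)) ((x : Int), ((y + 1 : Nat) : Int))
        have h2 := ih x (y + 1) (by omega) hx (by omega)
        omega
  exact fun x y hx hy => H ((N - x) + (N - y)) x y (le_refl _) hx hy

-- ===== fold ↔ recursion bridges =====

def pvInvF (s : Int × Int → Int) (inf : Int) (N x : Nat) (y : Int)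
    (d : Std.HashMap (Int × Int) Int) : Prop :=
  ∀ a b : Nat, a < N → b < N →
    d.getD ((a : Int), (b : Int)) inf =
      if a < x ∨ (a = x ∧ (b : Int) < y) then pvFwdRec s a b else s ((a : Int), (b : Int))

-- one forward-sweep cell update preserves the invariant
theorem pvStepF (s : Int × Int → Int) (inf : Int) (N x y0 : Nat)
    (hx : x < N) (hy : y0 < N) (d : Std.HashMap (Int × Int) Int)
    (h : pvInvF s inf N x (y0 : Int) d) :
    pvInvF s inf N x ((y0 : Int) + 1) (altFwdStep inf d ((x : Int)) ((y0 : Int))) := by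
  have r1 : d.getD ((x : Int), (y0 : Int)) inf = s ((x : Int), (y0 : Int)) := by
    rw [h x y0 hx hy, if_neg (by omega)]
  have r2 : 0 < x → d.getD ((x : Int) - 1, (y0 : Int)) inf = pvFwdRec s (x - 1) y0 := by
    intro hx0
    have hc : ((x : Int) - 1) = (((x - 1 : Nat)) : Int) := by omega
    rw [hc, h (x - 1) y0 (by omega) hy, if_pos (by left; omega)]
  have r3 : 0 < y0 → d.getD ((x : Int), (y0 : Int) - 1) inf = pvFwdRec s x (y0 - 1) := by
    intro hy0
    have hc : ((y0 : Int) - 1) = (((y0 - 1 : Nat)) : Int) := by omega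
    rw [hc, h x (y0 - 1) hx (by omega), if_pos (by right; omega)]
  intro a b ha hb
  simp only [altFwdStep]
  rw [pvGetD_insert]
  by_cases hab : (((a : Int), (b : Int)) : Int × Int) = ((x : Int), (y0 : Int))
  · have hax : a = x ∧ b = y0 := by
      rw [Prod.mk.injEq] at hab
      omega
    obtain ⟨rfl, rfl⟩ := hax
    rw [if_pos hab,
      if_pos (show a < a ∨ (a = a ∧ (b : Int) < (b : Int) + 1) from
        Or.inr ⟨rfl, by omega⟩),
      pvFwdRec]
    have gx : ((0 : Int) < (a : Int)) = (0 < a) := propext (by omega)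
    have gy : ((0 : Int) < (b : Int)) = (0 < b) := propext (by omega)
    simp only [gx, gy]
    by_cases h1 : 0 < a <;> by_cases h2 : 0 < b
    · simp only [if_pos h1, if_pos h2, dif_pos h1, dif_pos h2, r1, r2 h1, r3 h2]
    · simp only [if_pos h1, if_neg h2, dif_pos h1, dif_neg h2, r1, r2 h1]
    · simp only [if_neg h1, if_pos h2, dif_neg h1, dif_pos h2, r1, r3 h2]
    · simp only [if_neg h1, if_neg h2, dif_neg h1, dif_neg h2, r1]
  · rw [if_neg hab, h a b ha hb]
    have hne : ¬(a = x ∧ b = y0) := by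
      intro ⟨h1, h2⟩
      exact hab (by rw [h1, h2])
    split_ifs <;> first | rfl | omega

-- the inner (y) loop of the forward sweep
theorem pvInnerF (s : Int × Int → Int) (inf : Int) (N : Nat) (n : Int)
    (hn : n = (N : Int)) (x : Nat) (hx : x < N) :
    ∀ (k y0 : Nat) (d : Std.HashMap (Int × Int) Int), y0 + k = N →
      pvInvF s inf N x (y0 : Int) d →
      pvInvF s inf N x (N : Int)
        ((PySem.List.pyRange (y0 : Int) n 1).foldl
          (fun d y => altFwdStep inf d ((x : Int)) y) d) := by
  intro k
  induction k with
  | zero =>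
    intro y0 d hk h
    have hy0 : y0 = N := by omega
    subst hy0
    rw [hn, PySem.List.pyRange_one_eq_nil (le_refl _)]
    exact h
  | succ k ih =>
    intro y0 d hk h
    have hy0 : y0 < N := by omega
    have hlt : (y0 : Int) < n := by omega
    rw [PySem.List.pyRange_one_cons hlt, List.foldl_cons]
    have hstep := pvStepF s inf N x y0 hx hy0 d h
    have hcast : ((y0 : Int) + 1) = (((y0 + 1 : Nat)) : Int) := by omega
    rw [hcast] at hstep ⊢
    exact ih (y0 + 1) _ (by omega) hstep

theorem pvInvF_row (s : Int × Int → Int) (inf : Int) (N x0 : Nat)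
    (d : Std.HashMap (Int × Int) Int) (h : pvInvF s inf N x0 (N : Int) d) :
    pvInvF s inf N (x0 + 1) (0 : Int) d := by
  intro a b ha hb
  rw [h a b ha hb]
  split_ifs <;> first | rfl | omega

-- the outer (x) loop of the forward sweep
theorem pvOuterF (s : Int × Int → Int) (inf : Int) (N : Nat) (n : Int)
    (hn : n = (N : Int)) :
    ∀ (k x0 : Nat) (d : Std.HashMap (Int × Int) Int), x0 + k = N →
      pvInvF s inf N x0 (0 : Int) d →
      pvInvF s inf N N (0 : Int)
        ((PySem.List.pyRange (x0 : Int) n 1).foldl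
          (fun d x => (PySem.List.pyRange 0 n 1).foldl
            (fun d y => altFwdStep inf d x y) d) d) := by
  intro k
  induction k with
  | zero =>
    intro x0 d hk h
    have hx0 : x0 = N := by omega
    subst hx0
    rw [hn, PySem.List.pyRange_one_eq_nil (le_refl _)]
    exact h
  | succ k ih =>
    intro x0 d hk h
    have hx0 : x0 < N := by omega
    have hlt : (x0 : Int) < n := by omega
    rw [PySem.List.pyRange_one_cons hlt, List.foldl_cons]
    have hinner := pvInnerF s inf N n hn x0 hx0 N 0 d (by omega) h
    have hrow := pvInvF_row s inf N x0 _ hinner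
    exact ih (x0 + 1) _ (by omega) hrow

theorem altFwd_char (agents : List (Int × Int)) (n : Int) (N : Nat) (hn : n = (N : Int)) :
    ∀ a b : Nat, a < N → b < N →
      (altFwd agents n).getD ((a : Int), (b : Int)) (altINF agents n) =
        pvFwdRec (pvSeedAt agents n) a b := by
  intro a b ha hb
  have h0 : pvInvF (pvSeedAt agents n) (altINF agents n) N 0 (0 : Int)
      (altSeed agents n) := by
    intro a b ha hb
    rw [if_neg (by omega)]
    rfl
  have hout := pvOuterF (pvSeedAt agents n) (altINF agents n) N n hn N 0
    (altSeed agents n) (by omega) h0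
  simp only [Nat.cast_zero] at hout
  unfold altFwd
  rw [hout a b ha hb, if_pos (by left; exact ha)]

def pvInvB (F : Int × Int → Int) (inf : Int) (N : Nat) (x y : Int)
    (d : Std.HashMap (Int × Int) Int) : Prop :=
  ∀ a b : Nat, a < N → b < N →
    d.getD ((a : Int), (b : Int)) inf =
      if x < (a : Int) ∨ ((a : Int) = x ∧ y < (b : Int)) then pvBwdRec F N a b
      else F ((a : Int), (b : Int))

-- one backward-sweep cell update preserves the invariant
theorem pvStepB (F : Int × Int → Int) (inf : Int) (N : Nat) (n : Int)
    (hn : n = (N : Int)) (x y0 : Nat) (hx : x < N) (hy : y0 < N)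
    (d : Std.HashMap (Int × Int) Int) (h : pvInvB F inf N ((x : Int)) ((y0 : Int)) d) :
    pvInvB F inf N ((x : Int)) ((y0 : Int) - 1) (altBwdStep n inf d ((x : Int)) ((y0 : Int))) := by
  have r1 : d.getD ((x : Int), (y0 : Int)) inf = F ((x : Int), (y0 : Int)) := by
    rw [h x y0 hx hy, if_neg (by omega)]
  have r2 : x < N - 1 → d.getD ((x : Int) + 1, (y0 : Int)) inf = pvBwdRec F N (x + 1) y0 := by
    intro hx0
    have hc : ((x : Int) + 1) = (((x + 1 : Nat)) : Int) := by omega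
    rw [hc, h (x + 1) y0 (by omega) hy, if_pos (by left; omega)]
  have r3 : y0 < N - 1 → d.getD ((x : Int), (y0 : Int) + 1) inf = pvBwdRec F N x (y0 + 1) := by
    intro hy0
    have hc : ((y0 : Int) + 1) = (((y0 + 1 : Nat)) : Int) := by omega
    rw [hc, h x (y0 + 1) hx (by omega), if_pos (by right; constructor <;> omega)]
  intro a b ha hb
  simp only [altBwdStep]
  rw [pvGetD_insert]
  by_cases hab : (((a : Int), (b : Int)) : Int × Int) = ((x : Int), (y0 : Int))
  · have hax : a = x ∧ b = y0 := by
      rw [Prod.mk.injEq] at hab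
      omega
    obtain ⟨rfl, rfl⟩ := hax
    rw [if_pos hab,
      if_pos (show (a : Int) < (a : Int) ∨ ((a : Int) = (a : Int) ∧ (b : Int) - 1 < (b : Int)) from
        Or.inr ⟨rfl, by omega⟩),
      pvBwdRec]
    have gx : (((a : Int)) < n - 1) = (a < N - 1) := propext (by omega)
    have gy : (((b : Int)) < n - 1) = (b < N - 1) := propext (by omega)
    simp only [gx, gy]
    by_cases h1 : a < N - 1 <;> by_cases h2 : b < N - 1
    · simp only [if_pos h1, if_pos h2, dif_pos h1, dif_pos h2, r1, r2 h1, r3 h2]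
    · simp only [if_pos h1, if_neg h2, dif_pos h1, dif_neg h2, r1, r2 h1]
    · simp only [if_neg h1, if_pos h2, dif_neg h1, dif_pos h2, r1, r3 h2]
    · simp only [if_neg h1, if_neg h2, dif_neg h1, dif_neg h2, r1]
  · rw [if_neg hab, h a b ha hb]
    have hne : ¬(a = x ∧ b = y0) := by
      intro ⟨h1, h2⟩
      exact hab (by rw [h1, h2])
    split_ifs <;> first | rfl | omega

-- the inner (y) loop of the backward sweep
theorem pvInnerB (F : Int × Int → Int) (inf : Int) (N : Nat) (n : Int)
    (hn : n = (N : Int)) (x : Nat) (hx : x < N) :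
    ∀ (k : Nat) (d : Std.HashMap (Int × Int) Int), k ≤ N →
      pvInvB F inf N ((x : Int)) ((k : Int) - 1) d →
      pvInvB F inf N ((x : Int)) (-1)
        ((PySem.List.pyRange ((k : Int) - 1) (-1) (-1)).foldl
          (fun d y => altBwdStep n inf d ((x : Int)) y) d) := by
  intro k
  induction k with
  | zero =>
    intro d hk h
    simp only [Nat.cast_zero, zero_sub] at h ⊢
    rw [PySem.List.pyRange_neg_one_eq_nil (le_refl _)]
    exact h
  | succ k ih =>
    intro d hk h
    have hc : (((k + 1 : Nat)) : Int) - 1 = (k : Int) := by push_cast; ring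
    rw [hc] at h ⊢
    rw [PySem.List.pyRange_neg_one_cons (show (-1 : Int) < (k : Int) by omega),
      List.foldl_cons]
    have hstep := pvStepB F inf N n hn x k hx (by omega) d h
    exact ih _ (by omega) hstep

theorem pvInvB_row (F : Int × Int → Int) (inf : Int) (N x0 : Nat)
    (d : Std.HashMap (Int × Int) Int) (h : pvInvB F inf N ((x0 : Int)) (-1) d) :
    pvInvB F inf N ((x0 : Int) - 1) ((N : Int) - 1) d := by
  intro a b ha hb
  rw [h a b ha hb]
  split_ifs <;> first | rfl | omega

-- the outer (x) loop of the backward sweep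
theorem pvOuterB (F : Int × Int → Int) (inf : Int) (N : Nat) (n : Int)
    (hn : n = (N : Int)) :
    ∀ (k : Nat) (d : Std.HashMap (Int × Int) Int), k ≤ N →
      pvInvB F inf N ((k : Int) - 1) ((N : Int) - 1) d →
      pvInvB F inf N (-1) ((N : Int) - 1)
        ((PySem.List.pyRange ((k : Int) - 1) (-1) (-1)).foldl
          (fun d x => (PySem.List.pyRange (n - 1) (-1) (-1)).foldl
            (fun d y => altBwdStep n inf d x y) d) d) := by
  intro k
  induction k with
  | zero =>
    intro d hk h
    simp only [Nat.cast_zero, zero_sub] at h ⊢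
    rw [PySem.List.pyRange_neg_one_eq_nil (le_refl _)]
    exact h
  | succ k ih =>
    intro d hk h
    have hc : (((k + 1 : Nat)) : Int) - 1 = (k : Int) := by push_cast; ring
    rw [hc] at h ⊢
    rw [PySem.List.pyRange_neg_one_cons (show (-1 : Int) < (k : Int) by omega),
      List.foldl_cons]
    have hrange : n - 1 = ((N : Int)) - 1 := by omega
    have hinner := pvInnerB F inf N n hn k (by omega) N d (le_refl _) h
    rw [← hrange] at hinner
    have hrow := pvInvB_row F inf N k _ hinner
    exact ih _ (by omega) hrow

theorem altBwd_char (agents : List (Int × Int)) (n : Int) (N : Nat) (hn : n = (N : Int)) :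
    ∀ a b : Nat, a < N → b < N →
      (altBwd agents n).getD ((a : Int), (b : Int)) (altINF agents n) =
        pvBwdRec (fun p => (altFwd agents n).getD p (altINF agents n)) N a b := by
  intro a b ha hb
  have h0 : pvInvB (fun p => (altFwd agents n).getD p (altINF agents n))
      (altINF agents n) N ((N : Int) - 1) ((N : Int) - 1) (altFwd agents n) := by
    intro a b ha hb
    rw [if_neg (by omega)]
  have hout := pvOuterB (fun p => (altFwd agents n).getD p (altINF agents n))
    (altINF agents n) N n hn N (altFwd agents n) (le_refl _) h0
  unfold altBwd
  rw [← (show n - 1 = ((N : Int)) - 1 from by omega)] at hout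
  rw [hout a b ha hb, if_pos (by left; omega)]

-- ===== assembly =====

theorem pvDist_final (agents : List (Int × Int)) (n : Int) (N : Nat)
    (hn : n = (N : Int)) (hN : 0 < N) (hA : agents ≠ []) :
    ∀ c ∈ altCells n,
      (altBwd agents n).getD c (altINF agents n) = pvD agents c := by
  intro c hc
  obtain ⟨a, b, ha, hb, rfl⟩ := cell_to_nat hn hc
  have hn0 : 0 < n := by omega
  have hcellsmem : ∀ u v : Nat, u < N → v < N →
      (((u : Int), (v : Int)) : Int × Int) ∈ altCells n := by
    intro u v hu hv
    exact mem_altCells.mpr ⟨by omega, by omega, by omega, by omega⟩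
  rw [altBwd_char agents n N hn a b ha hb]
  have hFle : ∀ x y a' b' : Nat, a' ≤ x → x < N → b' ≤ y → y < N →
      (fun p => (altFwd agents n).getD p (altINF agents n)) ((x : Int), (y : Int)) ≤
        pvSeedAt agents n ((a' : Int), (b' : Int)) + ((x : Int) - a') + ((y : Int) - b') := by
    intro x y a' b' h1 h2 h3 h4
    simp only
    rw [altFwd_char agents n N hn x y h2 h4]
    exact pvFwdRec_le (pvSeedAt agents n) x y a' b' h1 h3
  have hub := pvBwdRec_le (fun p => (altFwd agents n).getD p (altINF agents n))
    (pvSeedAt agents n) N hFle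
  have hgF : ∀ u v : Nat, u < N → v < N →
      pvG agents n ((u : Int), (v : Int)) ≤
        (fun p => (altFwd agents n).getD p (altINF agents n)) ((u : Int), (v : Int)) := by
    intro u v hu hv
    simp only
    rw [altFwd_char agents n N hn u v hu hv]
    refine pvFwdRec_ge (pvSeedAt agents n) (pvG agents n) N ?_ ?_ u v hu hv
    · intro u v hu hv
      exact pvG_le_seed agents n (hcellsmem u v hu hv)
    · intro p q
      exact pvG_lip agents n hn0 p q
  have hlb := pvBwdRec_ge (fun p => (altFwd agents n).getD p (altINF agents n))
    (pvG agents n) N hgF (fun p q => pvG_lip agents n hn0 p q) a b ha hb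
  have hGD := pvG_eq_pvD agents n hA hn0 (hcellsmem a b ha hb)
  apply le_antisymm
  · obtain ⟨q, hq, he⟩ := pvG_attain agents n ((a : Int), (b : Int)) hn0
    obtain ⟨u, v, hu, hv, rfl⟩ := cell_to_nat hn hq
    have h1 := hub a b u v ha hb hu hv
    rw [← hGD]
    omega
  · rw [← hGD]
    exact hlb

theorem advice_eq_alt (agents : List (Int × Int)) (n : Int) (h : agents ≠ []) :
    advice agents n = advice_alt agents n := by
  by_cases hn : n ≤ 0
  · have hnil : PySem.List.pyRange 0 n 1 = [] := PySem.List.pyRange_one_eq_nil hn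
    unfold advice advice_alt
    rw [hnil, if_pos hn]
    simp
  · obtain ⟨N, hN⟩ : ∃ N : Nat, n = (N : Int) := ⟨n.toNat, by omega⟩
    have hN0 : 0 < N := by omega
    have hfin := pvDist_final agents n N hN hN0 h
    have hmap : (altCells n).map (fun c => (altBwd agents n).getD c (altINF agents n))
        = (altCells n).map (pvD agents) := List.map_congr_left hfin
    have hbest : (PySem.List.max? ((altCells n).map
        (fun c => (altBwd agents n).getD c (altINF agents n))) (fun d => d)).getD 0
        = pvM agents (altCells n) := by
      rw [hmap, pvBest_eq]
    rw [advice_char agents n h]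
    simp only [advice_alt]
    rw [if_neg (show ¬ n ≤ 0 by omega), hbest]
    by_cases h0 : pvM agents (altCells n) = 0
    · rw [if_pos h0, if_pos h0]
    · rw [if_neg h0, if_neg h0]
      refine (List.filter_congr ?_).symm
      intro c hc
      rw [hfin c hc]

-- ===== VERDICT (by name: the statement is the Claim_ definition above) =====
theorem advice_spec : Claim_equal_advice := by
  intro agents n _ hpre
  unfold Spec_advice
  by_cases h : agents = []
  · subst h
    rcases hpre with h | h
    · exact absurd rfl h
    · have hnil : PySem.List.pyRange 0 n 1 = [] := PySem.List.pyRange_one_eq_nil h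
      unfold advice advice_alt
      rw [hnil, if_pos h]
      simp
  · exact advice_eq_alt agents n h
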